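-- pv_equiv track=rewrite | github.com/manwar/perlweeklychallenge-club | challenge-216/roger-bell-west/python/ch-1.py | registrationnumber
-- ===== SOURCE A (Python) =====
-- from copy import deepcopy
--
-- def word2set(word):
--   r = set()
--   for c in word.lower():
--     if c >= 'a' and c <= 'z':
--       r.add(c)
--   return r
--
-- def registrationnumber(words, reg):
--   s = word2set(reg)
--   out = []
--   for w in words:
--     ss = deepcopy(s)
--     for char in word2set(w):
--       if char in ss:
--         ss -= set(char)
--         if len(ss) == 0:
--           out.append(w)
--           break
--   return out
-- ===== SOURCE B (Python) =====
-- def registrationnumber(words, reg):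
--   def letters(t):
--     r = set()
--     for c in t.lower():
--       if 'a' <= c <= 'z':
--         r.add(c)
--     return r
--   need = letters(reg)
--   if not need:
--     return []
--   index = {}
--   for i, w in enumerate(words):
--     for c in letters(w):
--       index.setdefault(c, set()).add(i)
--   hits = None
--   for c in need:
--     s = index.get(c, set())
--     hits = s if hits is None else hits & s
--   return [words[i] for i in sorted(hits)]
-- ===== Notes on version B (the rewrite author's own statement) =====
-- stated objective: alternative
-- what changed: Replaces A's per-word set-subtraction scan by an inverted index: build a dict mapping each letter to the set of indices of words containing it, intersect the index sets over the plate's letters (empty plate returns [] up front), and emit the words at the sorted surviving indices.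
import Mathlib
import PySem

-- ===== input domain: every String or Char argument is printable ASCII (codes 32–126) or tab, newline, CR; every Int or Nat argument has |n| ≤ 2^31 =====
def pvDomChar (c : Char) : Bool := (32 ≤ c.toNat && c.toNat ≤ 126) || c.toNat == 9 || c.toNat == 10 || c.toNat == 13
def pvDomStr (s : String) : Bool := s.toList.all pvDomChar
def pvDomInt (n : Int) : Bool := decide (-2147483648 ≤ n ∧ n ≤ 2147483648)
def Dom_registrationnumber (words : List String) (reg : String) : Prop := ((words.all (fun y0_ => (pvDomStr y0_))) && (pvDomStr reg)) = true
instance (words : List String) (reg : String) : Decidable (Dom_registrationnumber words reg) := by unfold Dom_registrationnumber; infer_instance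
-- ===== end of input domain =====

-- B replaces A's per-word set copy and element-removal scan by a staged
-- inverted index (letter → set of word indices), an intersection over the
-- plate's letters and a sorted-index readout; same results on every input.

-- ===== PORT A =====
-- word2set: fold over the lowered characters, adding each ASCII letter to a set.
def word2set (word : String) : PySem.Set Char :=
  (PySem.Str.lower word).toList.foldl
    (fun r c => if 'a' ≤ c ∧ c ≤ 'z' then PySem.Set.add r c else r) PySem.Set.empty

-- A's inner 'for char in word2set(w): … break' loop; returns whether w was appended.
-- It consumes the set in insertion order; the proofs below show the result depends
-- only on membership, so the port is independent of Python's set iteration order.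
def regInner : List Char → PySem.Set Char → Bool
  | [], _ => false
  | d :: ds, ss =>
    if PySem.Set.contains ss d then
      let ss2 := PySem.Set.diff ss (PySem.Set.ofList [d])
      if PySem.Set.len ss2 = 0 then true else regInner ds ss2
    else regInner ds ss

def registrationnumber (words : List String) (reg : String) : List String :=
  let s := word2set reg
  words.foldl (fun out w => if regInner (word2set w) s then out ++ [w] else out) []

-- ===== PORT B =====
-- Source B's 'letters' helper (same loop as A's module-level helper word2set).
def altLetters (t : String) : PySem.Set Char :=
  (PySem.Str.lower t).toList.foldl
    (fun r c => if 'a' ≤ c ∧ c ≤ 'z' then PySem.Set.add r c else r) PySem.Set.empty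

-- index.setdefault(c, set()).add(i) is Dict.modify at c with default empty set.
-- The inner loop consumes letters(w) in insertion order; the index is only
-- looked up afterwards, so the port is independent of Python's set order.
def altIndex (words : List String) : PySem.Dict Char (PySem.Set Int) :=
  (PySem.List.enumerate words).foldl
    (fun d iw => (altLetters iw.2).foldl
      (fun d c => PySem.Dict.modify d c [] (fun s => PySem.Set.add s iw.1)) d)
    PySem.Dict.empty

-- the intersection loop over need; its sorted readout is iteration-order
-- independent (proved below), so consuming the set in insertion order is exact.
def altHits (index : PySem.Dict Char (PySem.Set Int)) (need : PySem.Set Char) :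
    Option (PySem.Set Int) :=
  need.foldl (fun h c =>
    let s := PySem.Dict.getD index c []
    match h with
    | none => some s
    | some hs => some (PySem.Set.inter hs s)) none

def registrationnumber_alt (words : List String) (reg : String) : List String :=
  let need := altLetters reg
  if need = [] then []
  else
    let index := altIndex words
    let hits := altHits index need
    (PySem.List.sorted (hits.getD []) (fun x => x) false).map
      (fun i => PySem.List.pyGetD words i "")

-- ===== PRECONDITION & SPEC =====
def Spec_registrationnumber (words : List String) (reg : String) (out : List String) : Prop := out = registrationnumber_alt words reg
instance (words : List String) (reg : String) (out : List String) : Decidable (Spec_registrationnumber words reg out) := by unfold Spec_registrationnumber; infer_instance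

-- ===== CLAIM (what is proved, stated in full; the proofs are below) =====
def Claim_equal_registrationnumber : Prop := ∀ (words : List String) (reg : String), Dom_registrationnumber words reg → Spec_registrationnumber words reg (registrationnumber words reg)

-- ===== LEMMAS AND PROOFS =====

lemma altLetters_eq_word2set (t : String) : altLetters t = word2set t := rfl

lemma nodup_word2set (t : String) : (word2set t).Nodup := by
  unfold word2set
  generalize (PySem.Str.lower t).toList = cs
  have h : ∀ (r : PySem.Set Char), r.Nodup →
      (cs.foldl (fun r c => if 'a' ≤ c ∧ c ≤ 'z' then PySem.Set.add r c else r) r).Nodup := by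
    induction cs with
    | nil => intro r hr; exact hr
    | cons c cs ih =>
      intro r hr
      simp only [List.foldl_cons]
      split_ifs
      · exact ih _ (PySem.Set.nodup_add _ _ hr)
      · exact ih _ hr
  exact h PySem.Set.empty List.nodup_nil

-- A's inner loop appends w exactly when the required set is nonempty and
-- contained (as a set) in the word's letters.
lemma regInner_iff (ds : List Char) (ss : PySem.Set Char) (hnd : ss.Nodup) :
    regInner ds ss = true ↔ (ss ≠ [] ∧ ∀ c ∈ ss, c ∈ ds) := by
  induction ds generalizing ss with
  | nil =>
    simp only [regInner]
    constructor
    · intro h; exact absurd h (by simp)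
    · rintro ⟨hne, hall⟩
      cases ss with
      | nil => exact absurd rfl hne
      | cons c cs => exact absurd (hall c List.mem_cons_self) (List.not_mem_nil)
  | cons d ds ih =>
    by_cases hd : PySem.Set.contains ss d = true
    · have hdm : d ∈ ss := (PySem.Set.contains_iff _ _).mp hd
      have hm2 : ∀ x, x ∈ PySem.Set.diff ss (PySem.Set.ofList [d]) ↔ x ∈ ss ∧ x ≠ d := by
        intro x
        rw [PySem.Set.mem_diff]
        simp [PySem.Set.mem_ofList]
      by_cases hlen : PySem.Set.len (PySem.Set.diff ss (PySem.Set.ofList [d])) = 0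
      · have hnil : PySem.Set.diff ss (PySem.Set.ofList [d]) = [] :=
          List.length_eq_zero_iff.mp (by simpa [PySem.Set.len] using hlen)
        have hall : ∀ c ∈ ss, c = d := by
          intro c hc
          by_contra hne
          have : c ∈ PySem.Set.diff ss (PySem.Set.ofList [d]) := (hm2 c).mpr ⟨hc, hne⟩
          rw [hnil] at this
          exact absurd this (List.not_mem_nil)
        simp only [regInner, if_pos hd, if_pos hlen]
        constructor
        · intro _
          refine ⟨?_, fun c hc => ?_⟩
          · intro h; rw [h] at hdm; exact absurd hdm (List.not_mem_nil)
          · rw [hall c hc]; exact List.mem_cons_self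
        · intro _; trivial
      · have hnd2 : (PySem.Set.diff ss (PySem.Set.ofList [d])).Nodup := PySem.Set.nodup_diff _ _ hnd
        simp only [regInner, if_pos hd, if_neg hlen]
        rw [ih _ hnd2]
        have hne2 : PySem.Set.diff ss (PySem.Set.ofList [d]) ≠ [] := by
          intro h
          exact hlen (by rw [h]; simp [PySem.Set.len])
        constructor
        · rintro ⟨-, hsub⟩
          refine ⟨?_, fun c hc => ?_⟩
          · intro h; rw [h] at hdm; exact absurd hdm (List.not_mem_nil)
          · by_cases hcd : c = d
            · rw [hcd]; exact List.mem_cons_self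
            · exact List.mem_cons_of_mem _ (hsub c ((hm2 c).mpr ⟨hc, hcd⟩))
        · rintro ⟨-, hsub⟩
          refine ⟨hne2, fun c hc => ?_⟩
          obtain ⟨hcs, hcd⟩ := (hm2 c).mp hc
          rcases List.mem_cons.mp (hsub c hcs) with h | h
          · exact absurd h hcd
          · exact h
    · have hdm : d ∉ ss := fun h => hd ((PySem.Set.contains_iff _ _).mpr h)
      simp only [regInner, if_neg hd]
      rw [ih ss hnd]
      constructor
      · rintro ⟨h1, h2⟩
        exact ⟨h1, fun c hc => List.mem_cons_of_mem _ (h2 c hc)⟩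
      · rintro ⟨h1, h2⟩
        refine ⟨h1, fun c hc => ?_⟩
        rcases List.mem_cons.mp (h2 c hc) with h | h
        · exact absurd (h ▸ hc) hdm
        · exact h

lemma A_eq_filter (words : List String) (reg : String) :
    registrationnumber words reg =
      words.filter (fun w => regInner (word2set w) (word2set reg)) := by
  unfold registrationnumber
  rw [PySem.List.foldl_append_if]
  simp

-- the inner index loop over one word's letters: entry-wise effect on the dict.
lemma idx_inner (L : List Char) (d : PySem.Dict Char (PySem.Set Int)) (i : Int)
    (hnd : ∀ c, (d.getD c []).Nodup) :
    (∀ c, ((L.foldl (fun d c => PySem.Dict.modify d c [] (fun s => PySem.Set.add s i)) d).getD c []).Nodup) ∧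
    (∀ c x, x ∈ (L.foldl (fun d c => PySem.Dict.modify d c [] (fun s => PySem.Set.add s i)) d).getD c [] ↔
      x ∈ d.getD c [] ∨ (x = i ∧ c ∈ L)) := by
  induction L generalizing d with
  | nil => exact ⟨hnd, fun c x => by simp⟩
  | cons c0 L ih =>
    simp only [List.foldl_cons]
    have hstep : ∀ c, (PySem.Dict.modify d c0 [] (fun s => PySem.Set.add s i)).getD c [] =
        if c = c0 then PySem.Set.add (d.getD c0 []) i else d.getD c [] :=
      fun c => PySem.Dict.getD_modify d c0 c [] _
    have hnd1 : ∀ c, ((PySem.Dict.modify d c0 [] (fun s => PySem.Set.add s i)).getD c []).Nodup := by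
      intro c; rw [hstep c]; split_ifs
      · exact PySem.Set.nodup_add _ _ (hnd c0)
      · exact hnd c
    obtain ⟨h1, h2⟩ := ih _ hnd1
    refine ⟨h1, fun c x => ?_⟩
    rw [h2 c x, hstep c]
    by_cases hc : c = c0
    · subst hc
      rw [if_pos rfl]
      simp only [PySem.Set.mem_add, List.mem_cons]
      tauto
    · simp only [if_neg hc, List.mem_cons]
      constructor
      · rintro (h | ⟨hx, hL⟩)
        · exact Or.inl h
        · exact Or.inr ⟨hx, Or.inr hL⟩
      · rintro (h | ⟨hx, (hcc | hL)⟩)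
        · exact Or.inl h
        · exact absurd hcc hc
        · exact Or.inr ⟨hx, hL⟩

-- the whole index-building loop over the enumerated words.
lemma idx_outer (ps : List (Int × String)) (d : PySem.Dict Char (PySem.Set Int))
    (hnd : ∀ c, (d.getD c []).Nodup) :
    (∀ c, (((ps.foldl (fun d iw => (altLetters iw.2).foldl
        (fun d c => PySem.Dict.modify d c [] (fun s => PySem.Set.add s iw.1)) d) d)).getD c []).Nodup) ∧
    (∀ c x, x ∈ (ps.foldl (fun d iw => (altLetters iw.2).foldl
        (fun d c => PySem.Dict.modify d c [] (fun s => PySem.Set.add s iw.1)) d) d).getD c [] ↔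
      x ∈ d.getD c [] ∨ ∃ p ∈ ps, x = p.1 ∧ c ∈ altLetters p.2) := by
  induction ps generalizing d with
  | nil => exact ⟨hnd, fun c x => by simp⟩
  | cons p ps ih =>
    simp only [List.foldl_cons]
    obtain ⟨ha, hb⟩ := idx_inner (altLetters p.2) d p.1 hnd
    obtain ⟨h1, h2⟩ := ih _ ha
    refine ⟨h1, fun c x => ?_⟩
    rw [h2 c x, hb c x]
    simp only [List.mem_cons]
    constructor
    · rintro ((h | ⟨hx, hc⟩) | ⟨q, hq, hxq, hcq⟩)
      · exact Or.inl h
      · exact Or.inr ⟨p, Or.inl rfl, hx, hc⟩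
      · exact Or.inr ⟨q, Or.inr hq, hxq, hcq⟩
    · rintro (h | ⟨q, (hq | hq), hxq, hcq⟩)
      · exact Or.inl (Or.inl h)
      · subst hq; exact Or.inl (Or.inr ⟨hxq, hcq⟩)
      · exact Or.inr ⟨q, hq, hxq, hcq⟩

lemma altIndex_spec (words : List String) :
    (∀ c, ((altIndex words).getD c []).Nodup) ∧
    (∀ c x, x ∈ (altIndex words).getD c [] ↔
      ∃ (k : Nat) (_ : k < words.length), x = (k : Int) ∧ c ∈ altLetters words[k]) := by
  obtain ⟨h1, h2⟩ := idx_outer (PySem.List.enumerate words) PySem.Dict.empty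
    (fun c => by simp [PySem.Dict.getD_empty])
  refine ⟨fun c => h1 c, fun c x => ?_⟩
  unfold altIndex
  rw [h2 c x]
  simp only [PySem.Dict.getD_empty, List.not_mem_nil, false_or]
  constructor
  · rintro ⟨p, hp, hx, hc⟩
    obtain ⟨k, hk, hpk⟩ := (PySem.List.mem_enumerate_iff _ _ _).mp hp
    subst hpk
    exact ⟨k, hk, by simpa using hx, by simpa using hc⟩
  · rintro ⟨k, hk, hx, hc⟩
    exact ⟨((k : Int), words[k]), (PySem.List.mem_enumerate_iff _ _ _).mpr ⟨k, hk, by simp⟩, hx, hc⟩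

-- the intersection fold, from an already-started accumulator.
lemma hits_fold (index : PySem.Dict Char (PySem.Set Int)) (cs : List Char)
    (s0 : PySem.Set Int) (h0 : s0.Nodup) :
    ∃ S : PySem.Set Int,
      cs.foldl (fun h c =>
        let s := PySem.Dict.getD index c []
        match h with
        | none => some s
        | some hs => some (PySem.Set.inter hs s)) (some s0) = some S ∧
      S.Nodup ∧ ∀ x, x ∈ S ↔ x ∈ s0 ∧ ∀ c ∈ cs, x ∈ index.getD c [] := by
  induction cs generalizing s0 with
  | nil => exact ⟨s0, rfl, h0, fun x => by simp⟩
  | cons c cs ih =>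
    obtain ⟨S, hS, hnd, hmem⟩ := ih (PySem.Set.inter s0 (index.getD c []))
      (PySem.Set.nodup_inter _ _ h0)
    refine ⟨S, hS, hnd, fun x => ?_⟩
    rw [hmem x, PySem.Set.mem_inter]
    simp only [List.mem_cons]
    constructor
    · rintro ⟨⟨h1, h2⟩, h3⟩
      refine ⟨h1, fun c' hc' => ?_⟩
      rcases hc' with h | h
      · exact h ▸ h2
      · exact h3 c' h
    · rintro ⟨h1, h2⟩
      exact ⟨⟨h1, h2 c (Or.inl rfl)⟩, fun c' hc' => h2 c' (Or.inr hc')⟩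

lemma altHits_spec (index : PySem.Dict Char (PySem.Set Int)) (c0 : Char) (cs : List Char)
    (hnd : ∀ c, (index.getD c []).Nodup) :
    ∃ S : PySem.Set Int, altHits index (c0 :: cs) = some S ∧ S.Nodup ∧
      ∀ x, x ∈ S ↔ ∀ c ∈ c0 :: cs, x ∈ index.getD c [] := by
  obtain ⟨S, hS, h1, h2⟩ := hits_fold index cs (index.getD c0 []) (hnd c0)
  refine ⟨S, hS, h1, fun x => ?_⟩
  rw [h2 x]
  simp only [List.mem_cons]
  constructor
  · rintro ⟨ha, hb⟩ c (hc | hc)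
    · exact hc ▸ ha
    · exact hb c hc
  · intro h
    exact ⟨h c0 (Or.inl rfl), fun c hc => h c (Or.inr hc)⟩

-- reading a list out at an increasing filtered index range is List.filter.
lemma filter_range_map (l : List String) (p : String → Bool) :
    (((List.range l.length).filter (fun k => p (l.getD k ""))).map (fun k => l.getD k "")) =
      l.filter p := by
  induction l with
  | nil => simp
  | cons a l ih =>
    rw [show (a :: l).length = l.length + 1 from rfl, List.range_succ_eq_map,
      List.filter_cons, List.filter_map]
    have hcomp : ((fun k => p ((a :: l).getD k "")) ∘ Nat.succ) = fun k => p (l.getD k "") := rfl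
    have hcomp2 : ((fun k : Nat => (a :: l).getD k "") ∘ Nat.succ) = fun k : Nat => l.getD k "" := rfl
    have h0 : p ((a :: l).getD 0 "") = p a := rfl
    rw [h0]
    by_cases hp : p a = true
    · rw [if_pos hp, List.map_cons, List.map_map, hcomp, hcomp2, ih, List.filter_cons_of_pos hp]
      rfl
    · rw [if_neg hp, List.map_map, hcomp, hcomp2, ih, List.filter_cons_of_neg hp]

-- B, on a nonempty letter set, is the subset filter.
lemma B_eq_filter (words : List String) (reg : String) (c0 : Char) (cs : List Char)
    (hneed : altLetters reg = c0 :: cs) :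
    registrationnumber_alt words reg =
      words.filter (fun w => decide (∀ c ∈ altLetters reg, c ∈ altLetters w)) := by
  have hgoal : registrationnumber_alt words reg =
      (PySem.List.sorted ((altHits (altIndex words) (c0 :: cs)).getD []) (fun x => x) false).map
        (fun i => PySem.List.pyGetD words i "") := by
    unfold registrationnumber_alt
    rw [hneed, if_neg (by simp)]
  rw [hgoal]
  obtain ⟨hndI, hmemI⟩ := altIndex_spec words
  obtain ⟨S, hS, hndS, hmemS⟩ := altHits_spec (altIndex words) c0 cs hndI
  rw [hS]
  simp only [Option.getD_some]
  -- the canonical strictly increasing listing of the hit indices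
  set pk : Nat → Bool := fun k => decide (∀ c ∈ c0 :: cs, c ∈ altLetters (words.getD k "")) with hpk
  set T : List Int := ((List.range words.length).filter pk).map Int.ofNat with hT
  have hmemT : ∀ x : Int, x ∈ T ↔
      ∃ (k : Nat) (_ : k < words.length), x = (k : Int) ∧ ∀ c ∈ c0 :: cs, c ∈ altLetters words[k] := by
    intro x
    rw [hT]
    simp only [List.mem_map, List.mem_filter, List.mem_range, Int.ofNat_eq_natCast]
    constructor
    · rintro ⟨k, ⟨hk, hpkk⟩, rfl⟩
      refine ⟨k, hk, rfl, ?_⟩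
      have := of_decide_eq_true hpkk
      intro c hc
      have h := this c hc
      rwa [List.getD_eq_getElem _ _ hk] at h
    · rintro ⟨k, hk, rfl, hall⟩
      refine ⟨k, ⟨hk, ?_⟩, rfl⟩
      apply decide_eq_true
      intro c hc
      rw [List.getD_eq_getElem _ _ hk]
      exact hall c hc
  have hmemS' : ∀ x : Int, x ∈ S ↔
      ∃ (k : Nat) (_ : k < words.length), x = (k : Int) ∧ ∀ c ∈ c0 :: cs, c ∈ altLetters words[k] := by
    intro x
    rw [hmemS x]
    constructor
    · intro h
      obtain ⟨k, hk, hx, -⟩ := (hmemI c0 x).mp (h c0 List.mem_cons_self)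
      refine ⟨k, hk, hx, fun c hc => ?_⟩
      obtain ⟨k', hk', hx', hc'⟩ := (hmemI c x).mp (h c hc)
      have : k = k' := by
        have := hx ▸ hx'
        exact_mod_cast this
      exact this ▸ hc'
    · rintro ⟨k, hk, rfl, hall⟩
      intro c hc
      exact (hmemI c _).mpr ⟨k, hk, rfl, hall c hc⟩
  have hTnd : T.Nodup := by
    rw [hT]
    exact (List.nodup_range.filter _).map (fun a b h => Int.ofNat.inj h)
  have hperm : T.Perm S := (List.perm_ext_iff_of_nodup hTnd hndS).mpr
    (fun x => (hmemT x).trans (hmemS' x).symm)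
  have hpw : T.Pairwise (fun a b : Int => (fun x => x : Int → Int) a < (fun x => x : Int → Int) b) := by
    rw [hT]
    refine List.Pairwise.map Int.ofNat (fun a b h => ?_) (List.pairwise_lt_range.filter pk)
    show Int.ofNat a < Int.ofNat b
    simpa [Int.ofNat_eq_natCast] using h
  rw [PySem.List.sorted_eq_of_perm_of_pairwise_lt S T (fun x : Int => x) hperm hpw]
  rw [hT, List.map_map]
  have : ((fun i : Int => PySem.List.pyGetD words i "") ∘ Int.ofNat) =
      fun k : Nat => words.getD k "" := by
    funext k
    exact PySem.List.pyGetD_natCast words k ""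
  rw [this]
  have := filter_range_map words (fun w => decide (∀ c ∈ c0 :: cs, c ∈ altLetters w))
  rw [hpk, this, hneed]

-- ===== VERDICT (by name: the statement is the Claim_ definition above) =====
theorem registrationnumber_spec : Claim_equal_registrationnumber := by
  intro words reg _
  unfold Spec_registrationnumber
  rw [A_eq_filter]
  cases hneed : altLetters reg with
  | nil =>
    unfold registrationnumber_alt
    rw [hneed, if_pos rfl]
    apply List.filter_eq_nil_iff.mpr
    intro w _
    rw [show word2set reg = [] from hneed]
    simp [regInner_iff _ [] List.nodup_nil]
  | cons c0 cs =>
    rw [B_eq_filter words reg c0 cs hneed]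
    apply List.filter_congr
    intro w _
    rw [Bool.eq_iff_iff, regInner_iff _ _ (nodup_word2set reg)]
    simp only [decide_eq_true_eq]
    rw [altLetters_eq_word2set, altLetters_eq_word2set]
    constructor
    · rintro ⟨-, h⟩; exact h
    · intro h
      exact ⟨by rw [show word2set reg = c0 :: cs from hneed]; simp, h⟩
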